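-- pv_equiv track=rewrite | github.com/anilbattini/Know-your-Dosha | scripts/process_pdf_foods.py | estimate_dosha_ratings
-- ===== SOURCE A (Python) =====
-- def estimate_dosha_ratings(food_name: str, dosha_type: str) -> int:
--     """Estimate dosha ratings based on food properties and dosha type"""
--     food_lower = food_name.lower()
--
--     # Vata pacifying foods (warm, moist, grounding)
--     if dosha_type == 'vata':
--         if any(word in food_lower for word in ['sweet', 'sour', 'salty', 'warm', 'moist', 'oily']):
--             return 5
--         elif any(word in food_lower for word in ['bitter', 'astringent', 'cold', 'dry', 'light']):
--             return 2
--         else: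
--             return 3
--
--     # Pitta pacifying foods (cooling, sweet, bitter, astringent)
--     elif dosha_type == 'pitta':
--         if any(word in food_lower for word in ['sweet', 'bitter', 'astringent', 'cooling', 'fresh']):
--             return 5
--         elif any(word in food_lower for word in ['sour', 'salty', 'pungent', 'hot', 'spicy']):
--             return 2
--         else:
--             return 3
--
--     # Kapha pacifying foods (light, dry, warm, pungent, bitter, astringent)
--     elif dosha_type == 'kapha':
--         if any(word in food_lower for word in ['pungent', 'bitter', 'astringent', 'light', 'dry', 'warm']):
--             return 5
--         elif any(word in food_lower for word in ['sweet', 'sour', 'salty', 'heavy', 'oily']):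
--             return 2
--         else:
--             return 3
--
--     return 3  # Default moderate rating
-- ===== SOURCE B (Python) =====
-- # Flat rule table: (dosha, keyword, score). One pass over the table with two
-- # boolean accumulators replaces A's three branches with per-branch any() scans.
-- FLAT_RULES = [
--     ('vata', 'sweet', 5), ('vata', 'sour', 5), ('vata', 'salty', 5),
--     ('vata', 'warm', 5), ('vata', 'moist', 5), ('vata', 'oily', 5),
--     ('vata', 'bitter', 2), ('vata', 'astringent', 2), ('vata', 'cold', 2),
--     ('vata', 'dry', 2), ('vata', 'light', 2),
--     ('pitta', 'sweet', 5), ('pitta', 'bitter', 5), ('pitta', 'astringent', 5),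
--     ('pitta', 'cooling', 5), ('pitta', 'fresh', 5),
--     ('pitta', 'sour', 2), ('pitta', 'salty', 2), ('pitta', 'pungent', 2),
--     ('pitta', 'hot', 2), ('pitta', 'spicy', 2),
--     ('kapha', 'pungent', 5), ('kapha', 'bitter', 5), ('kapha', 'astringent', 5),
--     ('kapha', 'light', 5), ('kapha', 'dry', 5), ('kapha', 'warm', 5),
--     ('kapha', 'sweet', 2), ('kapha', 'sour', 2), ('kapha', 'salty', 2),
--     ('kapha', 'heavy', 2), ('kapha', 'oily', 2),
-- ]
--
--
-- def estimate_dosha_ratings(food_name: str, dosha_type: str) -> int: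
--     """Estimate dosha ratings based on food properties and dosha type"""
--     food_lower = food_name.lower()
--     has_pos = False
--     has_neg = False
--     for dosha, word, score in FLAT_RULES:
--         hit = dosha == dosha_type and word in food_lower
--         has_pos = has_pos or (hit and score == 5)
--         has_neg = has_neg or (hit and score == 2)
--     if has_pos:
--         return 5
--     if has_neg:
--         return 2
--     return 3
-- ===== Notes on version B (the rewrite author's own statement) =====
-- stated objective: alternative
-- what changed: Replaces the three parallel if/elif branches (each with two any() substring scans) by one flat (dosha, keyword, score) rule table folded in a single pass with two boolean accumulators, then a shared priority decision 5 > 2 > 3.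
import Mathlib
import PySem

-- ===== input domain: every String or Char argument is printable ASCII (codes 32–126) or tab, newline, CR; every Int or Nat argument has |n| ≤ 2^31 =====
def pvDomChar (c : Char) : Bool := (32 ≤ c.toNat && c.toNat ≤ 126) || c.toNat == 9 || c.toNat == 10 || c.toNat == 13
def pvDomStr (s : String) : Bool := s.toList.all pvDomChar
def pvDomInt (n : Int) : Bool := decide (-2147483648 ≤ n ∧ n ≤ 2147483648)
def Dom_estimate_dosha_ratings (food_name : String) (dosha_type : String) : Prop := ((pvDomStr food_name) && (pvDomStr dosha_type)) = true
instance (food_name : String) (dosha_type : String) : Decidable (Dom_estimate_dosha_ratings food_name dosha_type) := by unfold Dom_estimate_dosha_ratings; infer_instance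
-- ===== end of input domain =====

-- B replaces A's three if/elif branches (two any() scans each) with one flat
-- (dosha, keyword, score) rule table folded in a single pass; objective: alternative.

-- ===== PORT A =====
def estimate_dosha_ratings (food_name : String) (dosha_type : String) : Int :=
  let food_lower := PySem.Str.lower food_name
  if dosha_type == "vata" then
    if (["sweet", "sour", "salty", "warm", "moist", "oily"].any
        (fun word => PySem.Str.isIn word food_lower)) then 5
    else if (["bitter", "astringent", "cold", "dry", "light"].any
        (fun word => PySem.Str.isIn word food_lower)) then 2
    else 3
  else if dosha_type == "pitta" then
    if (["sweet", "bitter", "astringent", "cooling", "fresh"].any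
        (fun word => PySem.Str.isIn word food_lower)) then 5
    else if (["sour", "salty", "pungent", "hot", "spicy"].any
        (fun word => PySem.Str.isIn word food_lower)) then 2
    else 3
  else if dosha_type == "kapha" then
    if (["pungent", "bitter", "astringent", "light", "dry", "warm"].any
        (fun word => PySem.Str.isIn word food_lower)) then 5
    else if (["sweet", "sour", "salty", "heavy", "oily"].any
        (fun word => PySem.Str.isIn word food_lower)) then 2
    else 3
  else 3

-- ===== PORT B =====
def pvFlatRules : List (String × String × Int) :=
  [("vata", "sweet", 5), ("vata", "sour", 5), ("vata", "salty", 5),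
   ("vata", "warm", 5), ("vata", "moist", 5), ("vata", "oily", 5),
   ("vata", "bitter", 2), ("vata", "astringent", 2), ("vata", "cold", 2),
   ("vata", "dry", 2), ("vata", "light", 2),
   ("pitta", "sweet", 5), ("pitta", "bitter", 5), ("pitta", "astringent", 5),
   ("pitta", "cooling", 5), ("pitta", "fresh", 5),
   ("pitta", "sour", 2), ("pitta", "salty", 2), ("pitta", "pungent", 2),
   ("pitta", "hot", 2), ("pitta", "spicy", 2),
   ("kapha", "pungent", 5), ("kapha", "bitter", 5), ("kapha", "astringent", 5),
   ("kapha", "light", 5), ("kapha", "dry", 5), ("kapha", "warm", 5),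
   ("kapha", "sweet", 2), ("kapha", "sour", 2), ("kapha", "salty", 2),
   ("kapha", "heavy", 2), ("kapha", "oily", 2)]

def estimate_dosha_ratings_alt (food_name : String) (dosha_type : String) : Int :=
  let food_lower := PySem.Str.lower food_name
  let st := pvFlatRules.foldl
    (fun (acc : Bool × Bool) r =>
      let hit := r.1 == dosha_type && PySem.Str.isIn r.2.1 food_lower
      (acc.1 || (hit && r.2.2 == 5), acc.2 || (hit && r.2.2 == 2)))
    (false, false)
  if st.1 then 5
  else if st.2 then 2
  else 3

-- ===== PRECONDITION & SPEC =====
def Spec_estimate_dosha_ratings (food_name : String) (dosha_type : String) (out : Int) : Prop := out = estimate_dosha_ratings_alt food_name dosha_type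
instance (food_name : String) (dosha_type : String) (out : Int) : Decidable (Spec_estimate_dosha_ratings food_name dosha_type out) := by unfold Spec_estimate_dosha_ratings; infer_instance

-- ===== CLAIM (what is proved, stated in full; the proofs are below) =====
def Claim_equal_estimate_dosha_ratings : Prop := ∀ (food_name : String) (dosha_type : String), Dom_estimate_dosha_ratings food_name dosha_type → Spec_estimate_dosha_ratings food_name dosha_type (estimate_dosha_ratings food_name dosha_type)

-- ===== LEMMAS AND PROOFS =====

-- ===== VERDICT (by name: the statement is the Claim_ definition above) =====
set_option maxHeartbeats 2000000 in
theorem estimate_dosha_ratings_spec : Claim_equal_estimate_dosha_ratings := by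
  intro food_name dosha_type _
  show estimate_dosha_ratings food_name dosha_type
      = estimate_dosha_ratings_alt food_name dosha_type
  simp only [estimate_dosha_ratings, estimate_dosha_ratings_alt, pvFlatRules,
    List.foldl, List.any]
  by_cases h1 : dosha_type = "vata"
  · subst h1; simp [Bool.or_assoc]
  · by_cases h2 : dosha_type = "pitta"
    · subst h2; simp [Bool.or_assoc]
    · by_cases h3 : dosha_type = "kapha"
      · subst h3; simp [Bool.or_assoc]
      · simp [h1, h2, h3, Ne.symm h1, Ne.symm h2, Ne.symm h3]
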